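-- pv_equiv track=rewrite | github.com/Irina0001/tasks | task1.py | max_multiplication
-- ===== SOURCE A (Python) =====
-- def max_multiplication(input_string):
--     if not isinstance(input_string, str):
--         return None
--
--     max_product = None
--     for i in range(len(input_string)-3):
--         current_sequence = input_string[i:i+4]
--         if current_sequence.isdigit():
--             product = 1
--             for digit in current_sequence:
--                 product*= int(digit)
--             if max_product is None or product > max_product:
--                 max_product = product
--
--     return max_product
-- ===== SOURCE B (Python) =====
-- def _flush(run, best):
--     # slide a 4-window over one maximal digit run
--     while len(run) >= 4:
--         p = run[0] * run[1] * run[2] * run[3]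
--         if best is None or p > best:
--             best = p
--         run = run[1:]
--     return best
--
--
-- def max_multiplication(input_string):
--     if not isinstance(input_string, str):
--         return None
--     best = None
--     run = []
--     for c in input_string:
--         if c.isdigit():
--             run.append(int(c))
--         else:
--             best = _flush(run, best)
--             run = []
--     return _flush(run, best)
-- ===== Notes on version B (the rewrite author's own statement) =====
-- stated objective: alternative
-- what changed: A slides an index-and-slice 4-window over the whole string, re-testing isdigit on every slice; B makes a single pass that accumulates maximal digit runs as int lists and slides the 4-window only inside each run.
import Mathlib
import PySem

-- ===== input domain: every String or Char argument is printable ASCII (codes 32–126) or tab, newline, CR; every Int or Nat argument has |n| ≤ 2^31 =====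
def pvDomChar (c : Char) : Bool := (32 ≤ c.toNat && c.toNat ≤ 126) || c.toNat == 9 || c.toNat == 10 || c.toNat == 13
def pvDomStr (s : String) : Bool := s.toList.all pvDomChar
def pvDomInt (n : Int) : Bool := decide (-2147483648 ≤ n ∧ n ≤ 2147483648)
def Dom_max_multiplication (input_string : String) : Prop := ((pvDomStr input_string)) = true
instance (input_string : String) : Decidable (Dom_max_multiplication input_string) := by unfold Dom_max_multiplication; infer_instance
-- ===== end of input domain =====

-- B replaces A's index-and-slice window scan by a single pass that accumulates maximal digit
-- runs and slides a 4-window over each run (objective: alternative; same return value).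

-- int(c) for a digit character c (exact for '0'..'9', the only chars reaching it inside Dom)
def pvDigitInt (c : Char) : Int := (c.toNat : Int) - 48

-- ===== PORT A =====
def max_multiplication (input_string : String) : Option Int :=
  let s := input_string.toList
  (PySem.List.pyRange 0 ((s.length : Int) - 3) 1).foldl
    (fun max_product i =>
      let current_sequence := PySem.List.slice s (some i) (some (i + 4))
      if PySem.Chars.strIsdigit current_sequence then
        let product := current_sequence.foldl (fun p digit => p * pvDigitInt digit) 1
        match max_product with
        | none => some product
        | some m => if product > m then some product else some m
      else max_product)
    none

-- ===== PORT B =====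
-- while len(run) >= 4: window run[0..3]; run = run[1:]
def pvFlush : List Int → Option Int → Option Int
  | a :: b :: c :: d :: t, best =>
      let p := a * b * c * d
      pvFlush (b :: c :: d :: t)
        (match best with
         | none => some p
         | some m => if p > m then some p else some m)
  | _, best => best

-- for c in input_string: grow the current digit run, or flush it at a non-digit
def pvScan : List Char → List Int → Option Int → Option Int
  | [], run, best => pvFlush run best
  | c :: t, run, best =>
      if PySem.Chars.isdigit c then pvScan t (run ++ [pvDigitInt c]) best
      else pvScan t [] (pvFlush run best)

def max_multiplication_alt (input_string : String) : Option Int :=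
  pvScan input_string.toList [] none

-- ===== PRECONDITION & SPEC =====
def Spec_max_multiplication (input_string : String) (out : Option Int) : Prop := out = max_multiplication_alt input_string
instance (input_string : String) (out : Option Int) : Decidable (Spec_max_multiplication input_string out) := by unfold Spec_max_multiplication; infer_instance

-- ===== CLAIM (what is proved, stated in full; the proofs are below) =====
def Claim_equal_max_multiplication : Prop := ∀ (input_string : String), Dom_max_multiplication input_string → Spec_max_multiplication input_string (max_multiplication input_string)

-- ===== LEMMAS AND PROOFS =====

-- A's window step, factored for the proof
def pvStepA (best : Option Int) (w : List Char) : Option Int :=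
  if PySem.Chars.strIsdigit w then
    let product := w.foldl (fun p digit => p * pvDigitInt digit) 1
    match best with
    | none => some product
    | some m => if product > m then some product else some m
  else best

-- A's scan, rewritten as structural recursion on suffixes
def pvScanA : List Char → Option Int → Option Int
  | [], best => best
  | x :: t, best =>
      if 3 ≤ t.length then pvScanA t (pvStepA best (x :: t.take 3)) else best

theorem pvScanA_short (t : List Char) (best : Option Int) (h : t.length < 4) :
    pvScanA t best = best := by
  cases t with
  | nil => rfl
  | cons x t =>
      simp only [List.length_cons] at h
      simp only [pvScanA]
      rw [if_neg (by omega)]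

theorem pvFlush_short (l : List Int) (best : Option Int) (h : l.length < 4) :
    pvFlush l best = best := by
  match l with
  | [] => rfl
  | [a] => rfl
  | [a, b] => rfl
  | [a, b, c] => rfl
  | a :: b :: c :: d :: t => simp at h; omega

theorem pvStrIsdigit_cons_iff (c : Char) (t : List Char) :
    PySem.Chars.strIsdigit (c :: t) = (PySem.Chars.isdigit c && t.all PySem.Chars.isdigit) := by
  simp [PySem.Chars.strIsdigit]

-- product of an all-digit 4-window: A's foldl equals B's literal product
theorem pvProd4 (a b c d : Char) :
    ([a, b, c, d].foldl (fun p digit => p * pvDigitInt digit) 1)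
    = pvDigitInt a * pvDigitInt b * pvDigitInt c * pvDigitInt d := by
  simp only [List.foldl]
  ring

-- A's index fold equals the suffix recursion pvScanA
theorem pvFoldA_eq_scanA (s : List Char) (best : Option Int) :
    (PySem.List.pyRange 0 ((s.length : Int) - 3) 1).foldl
      (fun bp i => pvStepA bp (PySem.List.slice s (some i) (some (i + 4)))) best
    = pvScanA s best := by
  induction s generalizing best with
  | nil => rw [PySem.List.pyRange_one_eq_nil (by simp)]; rfl
  | cons x t ih =>
      by_cases h : 3 ≤ t.length
      · have hlt : (0 : Int) < ((x :: t).length : Int) - 3 := by simp; omega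
        rw [PySem.List.pyRange_one_cons hlt]
        simp only [List.foldl_cons, zero_add]
        have hw : PySem.List.slice (x :: t) (some 0) (some 4) = x :: t.take 3 := by
          rw [PySem.List.slice_zero_start, PySem.List.slice_to _ (by norm_num)]
          simp [List.take_succ_cons]
        rw [hw]
        set best' := pvStepA best (x :: t.take 3) with hb
        have h1 : ((x :: t).length : Int) - 3 = 1 + ((t.length : Int) - 3) := by simp; omega
        rw [h1, PySem.List.pyRange_one]
        rw [show (1 + ((t.length : Int) - 3) - 1) = ((t.length : Int) - 3 - 0) from by ring]
        rw [List.foldl_map]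
        have ihm := ih best'
        rw [PySem.List.pyRange_one, List.foldl_map] at ihm
        have hscan : pvScanA (x :: t) best = pvScanA t best' := by
          simp only [pvScanA]; rw [if_pos h]
        rw [hscan, ← ihm]
        congr 1
        funext bp k
        have e1 : (1 + (k : Int)) = ((k + 1 : Nat) : Int) := by push_cast; ring
        have e3 : (0 + (k : Int)) = ((k : Nat) : Int) := by ring
        rw [e1]
        rw [show (((k + 1 : Nat) : Int) + 4) = ((k + 5 : Nat) : Int) from by push_cast; ring]
        rw [e3]
        rw [show (((k : Nat) : Int) + 4) = ((k + 4 : Nat) : Int) from by push_cast; ring]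
        rw [PySem.List.slice_natCast, PySem.List.slice_natCast]
        have hd : List.drop (k + 1) (x :: t) = List.drop k t := rfl
        rw [hd]
        simp only [show k + 5 - (k + 1) = 4 from by omega, show k + 4 - k = 4 from by omega]
      · rw [PySem.List.pyRange_one_eq_nil (by simp; omega)]
        simp only [pvScanA]
        rw [if_neg h]
        rfl

-- flushing an all-digit run at a non-digit boundary
theorem pvScanA_flush (r : List Char) (hr : ∀ c ∈ r, PySem.Chars.isdigit c)
    (c0 : Char) (hc0 : PySem.Chars.isdigit c0 = false) (t : List Char) (best : Option Int) :
    pvScanA (r ++ c0 :: t) best = pvScanA t (pvFlush (r.map pvDigitInt) best) := by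
  induction r generalizing best with
  | nil =>
      simp only [List.nil_append, List.map_nil, pvFlush]
      by_cases h : 3 ≤ t.length
      · conv_lhs => rw [pvScanA]
        rw [if_pos h]
        have hstep : pvStepA best (c0 :: t.take 3) = best := by
          simp [pvStepA, pvStrIsdigit_cons_iff, hc0]
        rw [hstep]
      · conv_lhs => rw [pvScanA]
        rw [if_neg h, pvScanA_short t best (by omega)]
  | cons x r ih =>
      have hx : PySem.Chars.isdigit x := hr x (by simp)
      have hr' : ∀ c ∈ r, PySem.Chars.isdigit c := fun c hc => hr c (by simp [hc])
      by_cases h3 : 3 ≤ r.length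
      · obtain ⟨b, r1, rfl⟩ : ∃ b r1, r = b :: r1 := by
          cases r with | nil => simp at h3 | cons b r1 => exact ⟨b, r1, rfl⟩
        obtain ⟨c, r2, rfl⟩ : ∃ c r2, r1 = c :: r2 := by
          cases r1 with | nil => simp at h3 | cons c r2 => exact ⟨c, r2, rfl⟩
        obtain ⟨d, r3, rfl⟩ : ∃ d r3, r2 = d :: r3 := by
          cases r2 with | nil => simp at h3 | cons d r3 => exact ⟨d, r3, rfl⟩
        have hb : PySem.Chars.isdigit b := hr' b (by simp)
        have hc : PySem.Chars.isdigit c := hr' c (by simp)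
        have hd : PySem.Chars.isdigit d := hr' d (by simp)
        rw [List.cons_append]
        conv_lhs => rw [pvScanA]
        rw [if_pos (by simp [List.length_append])]
        have hwin : ((b :: c :: d :: r3 ++ c0 :: t).take 3) = [b, c, d] := by
          simp [List.take_succ_cons]
        rw [hwin]
        have hstep : pvStepA best (x :: [b, c, d])
            = (match best with
               | none => some (pvDigitInt x * pvDigitInt b * pvDigitInt c * pvDigitInt d)
               | some m => if pvDigitInt x * pvDigitInt b * pvDigitInt c * pvDigitInt d > m
                           then some (pvDigitInt x * pvDigitInt b * pvDigitInt c * pvDigitInt d) else some m) := by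
          simp only [pvStepA]
          rw [if_pos (by simp [PySem.Chars.strIsdigit, hx, hb, hc, hd])]
          rw [show (x :: [b, c, d]) = [x, b, c, d] from rfl, pvProd4]
        rw [hstep, ih hr']
        rfl
      · -- the window reaches c0: no update, and the run is too short to flush
        rw [List.cons_append]
        conv_lhs => rw [pvScanA]
        by_cases h : 3 ≤ (r ++ c0 :: t).length
        · rw [if_pos h]
          have hmem : c0 ∈ (r ++ c0 :: t).take 3 := by
            rw [List.take_append]
            have h1 : r.take 3 = r := List.take_of_length_le (by omega)
            have h2 : (3 - r.length) = (3 - r.length - 1) + 1 := by omega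
            rw [h1, h2, List.take_succ_cons]
            simp
          have hall : ((r ++ c0 :: t).take 3).all PySem.Chars.isdigit = false := by
            rw [List.all_eq_false]
            exact ⟨c0, hmem, by simp [hc0]⟩
          have hstep : pvStepA best (x :: (r ++ c0 :: t).take 3) = best := by
            simp [pvStepA, pvStrIsdigit_cons_iff, hall]
          rw [hstep, ih hr']
          rw [pvFlush_short _ _ (by simp [List.length_map]; omega),
              pvFlush_short _ _ (by simp [List.length_map]; omega)]
        · rw [if_neg h]
          have ht : t.length < 4 := by simp [List.length_append] at h; omega
          rw [pvScanA_short t _ (by omega)]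
          rw [pvFlush_short _ _ (by simp [List.length_map]; omega)]

-- scanning an all-digit suffix
theorem pvScanA_run (r : List Char) (hr : ∀ c ∈ r, PySem.Chars.isdigit c) (best : Option Int) :
    pvScanA r best = pvFlush (r.map pvDigitInt) best := by
  induction r generalizing best with
  | nil => rfl
  | cons x r ih =>
      have hx : PySem.Chars.isdigit x := hr x (by simp)
      have hr' : ∀ c ∈ r, PySem.Chars.isdigit c := fun c hc => hr c (by simp [hc])
      by_cases h3 : 3 ≤ r.length
      · obtain ⟨b, r1, rfl⟩ : ∃ b r1, r = b :: r1 := by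
          cases r with | nil => simp at h3 | cons b r1 => exact ⟨b, r1, rfl⟩
        obtain ⟨c, r2, rfl⟩ : ∃ c r2, r1 = c :: r2 := by
          cases r1 with | nil => simp at h3 | cons c r2 => exact ⟨c, r2, rfl⟩
        obtain ⟨d, r3, rfl⟩ : ∃ d r3, r2 = d :: r3 := by
          cases r2 with | nil => simp at h3 | cons d r3 => exact ⟨d, r3, rfl⟩
        have hb : PySem.Chars.isdigit b := hr' b (by simp)
        have hc : PySem.Chars.isdigit c := hr' c (by simp)
        have hd : PySem.Chars.isdigit d := hr' d (by simp)
        conv_lhs => rw [pvScanA]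
        rw [if_pos (by simp)]
        have hwin : ((b :: c :: d :: r3).take 3) = [b, c, d] := by simp [List.take_succ_cons]
        rw [hwin]
        have hstep : pvStepA best (x :: [b, c, d])
            = (match best with
               | none => some (pvDigitInt x * pvDigitInt b * pvDigitInt c * pvDigitInt d)
               | some m => if pvDigitInt x * pvDigitInt b * pvDigitInt c * pvDigitInt d > m
                           then some (pvDigitInt x * pvDigitInt b * pvDigitInt c * pvDigitInt d) else some m) := by
          simp only [pvStepA]
          rw [if_pos (by simp [PySem.Chars.strIsdigit, hx, hb, hc, hd])]
          rw [show (x :: [b, c, d]) = [x, b, c, d] from rfl, pvProd4]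
        rw [hstep, ih hr']
        rfl
      · conv_lhs => rw [pvScanA]
        rw [if_neg h3]
        rw [pvFlush_short _ _ (by simp [List.length_map]; omega)]

-- the main bridge: A's suffix scan with a pending all-digit run equals B's run scan
theorem pvScanA_eq_pvScan (cs : List Char) (r : List Char)
    (hr : ∀ c ∈ r, PySem.Chars.isdigit c) (best : Option Int) :
    pvScanA (r ++ cs) best = pvScan cs (r.map pvDigitInt) best := by
  induction cs generalizing r best with
  | nil =>
      rw [List.append_nil]
      simp only [pvScan]
      exact pvScanA_run r hr best
  | cons c t ih =>
      simp only [pvScan]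
      by_cases hc : PySem.Chars.isdigit c
      · rw [if_pos hc]
        have hr2 : ∀ x ∈ r ++ [c], PySem.Chars.isdigit x := by
          intro x hx
          rcases List.mem_append.1 hx with h | h
          · exact hr x h
          · simp at h; subst h; exact hc
        have h2 := ih (r ++ [c]) hr2 best
        rw [List.map_append, List.append_assoc] at h2
        simpa using h2
      · rw [if_neg hc]
        rw [pvScanA_flush r hr c (by simp [hc]) t best]
        exact ih [] (by simp) _

-- ===== VERDICT (by name: the statement is the Claim_ definition above) =====
theorem max_multiplication_spec : Claim_equal_max_multiplication := by
  intro input_string _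
  show max_multiplication input_string = max_multiplication_alt input_string
  exact (pvFoldA_eq_scanA input_string.toList none).trans
    (pvScanA_eq_pvScan input_string.toList [] (by simp) none)
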